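-- pv_equiv track=rewrite | github.com/heyitsgautham/career-forge | project/backend/app/services/resume_agent.py | _build_achievements
-- ===== SOURCE A (Python) =====
-- def _escape_latex(text: str) -> str:
--     """Escape LaTeX special characters in plain text values."""
--     if not text:
--         return ""
--     # Order matters: backslash first to avoid double-escaping
--     text = text.replace("\\", "\\textbackslash{}")
--     text = text.replace("&", "\\&")
--     text = text.replace("%", "\\%")
--     text = text.replace("$", "\\$")
--     text = text.replace("#", "\\#")
--     text = text.replace("_", "\\_")
--     text = text.replace("{", "\\{")
--     text = text.replace("}", "\\}")
--     text = text.replace("~", "\\textasciitilde{}")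
--     text = text.replace("^", "\\textasciicircum{}")
--     return text
--
-- def _build_achievements(achievements: list) -> str:
--     """Build the Achievements section."""
--     if not achievements:
--         return ""
--     bullet_lines = "\n".join(
--         f"  \\resumeItem{{{_escape_latex(a)}}}" for a in achievements
--     )
--     return (
--         "\\section{Achievements}\n"
--         "\\resumeItemListStart\n"
--         f"{bullet_lines}\n"
--         "\\resumeItemListEnd"
--     )
-- ===== SOURCE B (Python) =====
-- _LATEX_TABLE = str.maketrans({
--     "\\": "\\textbackslash\\{\\}",
--     "&": "\\&",
--     "%": "\\%",
--     "$": "\\$",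
--     "#": "\\#",
--     "_": "\\_",
--     "{": "\\{",
--     "}": "\\}",
--     "~": "\\textasciitilde{}",
--     "^": "\\textasciicircum{}",
-- })
--
--
-- def _escape_latex(text: str) -> str:
--     """Escape LaTeX special characters in one pass via a translation table."""
--     return text.translate(_LATEX_TABLE)
--
--
-- def _build_achievements(achievements: list) -> str:
--     """Build the Achievements section."""
--     if not achievements:
--         return ""
--     lines = ["\\section{Achievements}", "\\resumeItemListStart"]
--     lines += ["  \\resumeItem{%s}" % _escape_latex(a) for a in achievements]
--     lines.append("\\resumeItemListEnd")
--     return "\n".join(lines)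
-- ===== Notes on version B (the rewrite author's own statement) =====
-- stated objective: idiomatic
-- what changed: B escapes LaTeX specials in ONE pass via a precomputed translation table (str.translate with a codepoint->replacement dict, backslash mapped directly to its fully re-escaped form) instead of A's ten sequential full-string .replace passes, and assembles the section as a single '\n'.join over a list of lines instead of an f-string around a joined bullet block.
import Mathlib
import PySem

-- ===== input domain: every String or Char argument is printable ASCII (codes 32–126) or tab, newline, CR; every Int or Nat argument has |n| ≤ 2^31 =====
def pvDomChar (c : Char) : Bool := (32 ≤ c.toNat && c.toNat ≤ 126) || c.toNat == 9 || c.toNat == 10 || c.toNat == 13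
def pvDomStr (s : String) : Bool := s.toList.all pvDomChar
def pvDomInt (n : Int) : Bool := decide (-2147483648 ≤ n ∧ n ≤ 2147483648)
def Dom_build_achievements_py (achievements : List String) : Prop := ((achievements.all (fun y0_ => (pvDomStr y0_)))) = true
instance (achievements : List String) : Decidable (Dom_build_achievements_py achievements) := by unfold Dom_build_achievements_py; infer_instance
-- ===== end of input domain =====

-- B replaces A's ten sequential .replace passes by a single translation-table pass and
-- builds the section by joining a list of lines (idiomatic; same output, proved equal).

-- ===== PORT A =====
def escape_latex_py (text : String) : String :=
  if text = "" then "" else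
    let t1 := PySem.Str.replace text "\\" "\\textbackslash{}"
    let t2 := PySem.Str.replace t1 "&" "\\&"
    let t3 := PySem.Str.replace t2 "%" "\\%"
    let t4 := PySem.Str.replace t3 "$" "\\$"
    let t5 := PySem.Str.replace t4 "#" "\\#"
    let t6 := PySem.Str.replace t5 "_" "\\_"
    let t7 := PySem.Str.replace t6 "{" "\\{"
    let t8 := PySem.Str.replace t7 "}" "\\}"
    let t9 := PySem.Str.replace t8 "~" "\\textasciitilde{}"
    let t10 := PySem.Str.replace t9 "^" "\\textasciicircum{}"
    t10

def build_achievements_py (achievements : List String) : String :=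
  if achievements = [] then "" else
    let bullet_lines := PySem.Str.join "\n"
      (achievements.map (fun a => "  \\resumeItem{" ++ escape_latex_py a ++ "}"))
    "\\section{Achievements}\n\\resumeItemListStart\n" ++ bullet_lines ++ "\n\\resumeItemListEnd"

-- ===== PORT B =====
def pvLatexTable : PySem.Dict Char String :=
  ⟨[('\\', "\\textbackslash\\{\\}"), ('&', "\\&"), ('%', "\\%"), ('$', "\\$"),
    ('#', "\\#"), ('_', "\\_"), ('{', "\\{"), ('}', "\\}"),
    ('~', "\\textasciitilde{}"), ('^', "\\textasciicircum{}")]⟩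

-- str.translate: every character is looked up in the table once; missing keys pass through.
def escape_latex_alt (text : String) : String :=
  String.ofList (text.toList.flatMap (fun c =>
    match PySem.Dict.get? pvLatexTable c with
    | some r => r.toList
    | none => [c]))

def build_achievements_py_alt (achievements : List String) : String :=
  if achievements = [] then "" else
    let lines := ["\\section{Achievements}", "\\resumeItemListStart"]
      ++ achievements.map (fun a => "  \\resumeItem{" ++ escape_latex_alt a ++ "}")
      ++ ["\\resumeItemListEnd"]
    PySem.Str.join "\n" lines

-- ===== PRECONDITION & SPEC =====
def Spec_build_achievements_py (achievements : List String) (out : String) : Prop := out = build_achievements_py_alt achievements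
instance (achievements : List String) (out : String) : Decidable (Spec_build_achievements_py achievements out) := by unfold Spec_build_achievements_py; infer_instance

-- ===== CLAIM (what is proved, stated in full; the proofs are below) =====
def Claim_equal_build_achievements_py : Prop := ∀ (achievements : List String), Dom_build_achievements_py achievements → Spec_build_achievements_py achievements (build_achievements_py achievements)

-- ===== LEMMAS AND PROOFS =====

-- substitute a single character
def pvSub (old : Char) (r : List Char) (c : Char) : List Char := if c = old then r else [c]

-- the combined per-character expansion realised by A's replace chain / B's table
def pvH (c : Char) : List Char :=
  if c = '\\' then "\\textbackslash\\{\\}".toList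
  else if c = '&' then "\\&".toList
  else if c = '%' then "\\%".toList
  else if c = '$' then "\\$".toList
  else if c = '#' then "\\#".toList
  else if c = '_' then "\\_".toList
  else if c = '{' then "\\{".toList
  else if c = '}' then "\\}".toList
  else if c = '~' then "\\textasciitilde{}".toList
  else if c = '^' then "\\textasciicircum{}".toList
  else [c]

theorem replace_go_single (c : Char) (r : List Char) :
    ∀ (fuel : Nat) (l acc : List Char), l.length ≤ fuel →
      PySem.Chars.replace.go [c] r fuel l acc = acc.reverse ++ l.flatMap (pvSub c r) := by
  intro fuel
  induction fuel with
  | zero =>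
    intro l acc h
    have : l = [] := List.eq_nil_of_length_eq_zero (Nat.le_zero.mp h)
    subst this
    simp [PySem.Chars.replace.go]
  | succ n ih =>
    intro l acc h
    cases l with
    | nil => simp [PySem.Chars.replace.go]
    | cons x t =>
      by_cases hx : x = c
      · subst hx
        have hpre : List.isPrefixOf [x] (x :: t) = true := by
          simp [List.isPrefixOf]
        rw [PySem.Chars.replace.go]
        simp only [hpre, if_pos]
        rw [ih _ _ (by simpa using Nat.le_of_succ_le_succ h)]
        simp [pvSub]
      · have hpre : List.isPrefixOf [c] (x :: t) = false := by
          simp [List.isPrefixOf]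
          intro hc; exact absurd hc.symm hx
        rw [PySem.Chars.replace.go]
        simp only [hpre]
        rw [if_neg (by simp)]
        rw [ih _ _ (by simpa using Nat.le_of_succ_le_succ h)]
        simp [pvSub, hx]

theorem replace_single (s : List Char) (c : Char) (r : List Char) :
    PySem.Chars.replace s [c] r = s.flatMap (pvSub c r) := by
  unfold PySem.Chars.replace
  simp only [List.isEmpty]
  exact replace_go_single c r s.length s [] (le_refl _)

theorem escape_py_toList (s : String) :
    (escape_latex_py s).toList = s.toList.flatMap pvH := by
  by_cases hs : s = ""
  · subst hs; simp [escape_latex_py]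
  · unfold escape_latex_py
    rw [if_neg hs]
    simp only [PySem.Str.toList_replace]
    have e1 : ("\\" : String).toList = ['\\'] := rfl
    have e2 : ("&" : String).toList = ['&'] := rfl
    have e3 : ("%" : String).toList = ['%'] := rfl
    have e4 : ("$" : String).toList = ['$'] := rfl
    have e5 : ("#" : String).toList = ['#'] := rfl
    have e6 : ("_" : String).toList = ['_'] := rfl
    have e7 : ("{" : String).toList = ['{'] := rfl
    have e8 : ("}" : String).toList = ['}'] := rfl
    have e9 : ("~" : String).toList = ['~'] := rfl
    have e10 : ("^" : String).toList = ['^'] := rfl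
    rw [e1, e2, e3, e4, e5, e6, e7, e8, e9, e10]
    rw [replace_single, replace_single, replace_single, replace_single, replace_single,
        replace_single, replace_single, replace_single, replace_single, replace_single]
    simp only [List.flatMap_assoc]
    apply List.flatMap_congr
    intro c _
    by_cases h1 : c = '\\'; · subst h1; decide
    by_cases h2 : c = '&'; · subst h2; decide
    by_cases h3 : c = '%'; · subst h3; decide
    by_cases h4 : c = '$'; · subst h4; decide
    by_cases h5 : c = '#'; · subst h5; decide
    by_cases h6 : c = '_'; · subst h6; decide
    by_cases h7 : c = '{'; · subst h7; decide
    by_cases h8 : c = '}'; · subst h8; decide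
    by_cases h9 : c = '~'; · subst h9; decide
    by_cases h10 : c = '^'; · subst h10; decide
    simp [pvSub, pvH, h1, h2, h3, h4, h5, h6, h7, h8, h9, h10]

theorem escape_alt_toList (s : String) :
    (escape_latex_alt s).toList = s.toList.flatMap pvH := by
  unfold escape_latex_alt
  rw [String.toList_ofList]
  apply List.flatMap_congr
  intro c _
  by_cases h1 : c = '\\'; · subst h1; decide
  by_cases h2 : c = '&'; · subst h2; decide
  by_cases h3 : c = '%'; · subst h3; decide
  by_cases h4 : c = '$'; · subst h4; decide
  by_cases h5 : c = '#'; · subst h5; decide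
  by_cases h6 : c = '_'; · subst h6; decide
  by_cases h7 : c = '{'; · subst h7; decide
  by_cases h8 : c = '}'; · subst h8; decide
  by_cases h9 : c = '~'; · subst h9; decide
  by_cases h10 : c = '^'; · subst h10; decide
  simp [pvLatexTable, PySem.Dict.get?, List.find?, pvH, Bool.beq_eq_decide_eq,
        h1, h2, h3, h4, h5, h6, h7, h8, h9, h10,
        Ne.symm h1, Ne.symm h2, Ne.symm h3, Ne.symm h4, Ne.symm h5,
        Ne.symm h6, Ne.symm h7, Ne.symm h8, Ne.symm h9, Ne.symm h10]

-- join over a nonempty list with one element appended at the end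
theorem join_append_singleton (sep x : List Char) :
    ∀ (l : List (List Char)), l ≠ [] →
      PySem.Chars.join sep (l ++ [x]) = PySem.Chars.join sep l ++ sep ++ x := by
  intro l
  induction l with
  | nil => intro h; exact absurd rfl h
  | cons p rest ih =>
    intro _
    cases rest with
    | nil => simp [PySem.Chars.join, List.intercalate]
    | cons q rrest =>
      have h2 := ih (by simp)
      simp only [List.cons_append] at h2 ⊢
      rw [PySem.Chars.join_cons_cons, h2, PySem.Chars.join_cons_cons sep p q rrest]
      simp [List.append_assoc]

theorem template_eq (nl l1 l2 l3 : List Char) (i0 : List Char) (tail : List (List Char)) :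
    PySem.Chars.join nl (l1 :: l2 :: i0 :: (tail ++ [l3])) =
      l1 ++ nl ++ l2 ++ nl ++ PySem.Chars.join nl (i0 :: tail) ++ nl ++ l3 := by
  rw [PySem.Chars.join_cons_cons, PySem.Chars.join_cons_cons,
      ← List.cons_append, join_append_singleton nl l3 (i0 :: tail) (by simp)]
  simp [List.append_assoc]

-- ===== VERDICT (by name: the statement is the Claim_ definition above) =====
theorem build_achievements_py_spec : Claim_equal_build_achievements_py := by
  intro achievements _
  unfold Spec_build_achievements_py build_achievements_py build_achievements_py_alt
  have hfun : (fun s => ("  \\resumeItem{" ++ escape_latex_py s ++ "}" : String))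
            = (fun s => ("  \\resumeItem{" ++ escape_latex_alt s ++ "}" : String)) := by
    funext s
    apply String.toList_inj.mp
    simp only [String.toList_append, escape_py_toList, escape_alt_toList]
  rw [hfun]
  cases achievements with
  | nil => simp
  | cons a rest =>
    rw [if_neg (by simp), if_neg (by simp)]
    apply String.toList_inj.mp
    simp only [String.toList_append, PySem.Str.toList_join, List.map_append, List.map_map,
               List.map_cons, List.map_nil, List.cons_append, List.nil_append]
    rw [template_eq]
    rw [show ("\\section{Achievements}\n\\resumeItemListStart\n" : String).toList
          = "\\section{Achievements}".toList ++ "\n".toList ++ "\\resumeItemListStart".toList ++ "\n".toList from rfl,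
        show ("\n\\resumeItemListEnd" : String).toList = "\n".toList ++ "\\resumeItemListEnd".toList from rfl]
    simp [List.append_assoc]
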